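-- pv_equiv track=rewrite | github.com/octomil/octomil-python | edgeml/hardware/_metal.py | _match_sku
-- ===== SOURCE A (Python) =====
-- _M_SERIES_SKUS: dict[str, tuple[int, float, int]] = {
--     # M1 family
--     "M1": (8, 68.25, 25),
--     "M1 Pro": (16, 200.0, 45),
--     "M1 Max": (32, 400.0, 75),
--     "M1 Ultra": (64, 800.0, 130),
--     # M2 family
--     "M2": (10, 100.0, 30),
--     "M2 Pro": (19, 200.0, 50),
--     "M2 Max": (38, 400.0, 80),
--     "M2 Ultra": (76, 800.0, 140),
--     # M3 family
--     "M3": (10, 100.0, 35),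
--     "M3 Pro": (18, 150.0, 50),
--     "M3 Max": (40, 400.0, 85),
--     "M3 Ultra": (80, 800.0, 150),
--     # M4 family
--     "M4": (10, 120.0, 40),
--     "M4 Pro": (20, 273.0, 60),
--     "M4 Max": (40, 546.0, 100),
--     "M4 Ultra": (80, 819.0, 160),
-- }
--
-- def _match_sku(chip_name: str) -> str | None:
--     """Match a chip name to an SKU table key."""
--     # Try exact match first
--     if chip_name in _M_SERIES_SKUS:
--         return chip_name
--
--     # Try removing "Apple " prefix
--     clean = chip_name.replace("Apple ", "").strip()
--     if clean in _M_SERIES_SKUS: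
--         return clean
--
--     # Try matching progressively: "M4 Max" -> "M4 Max", "M4 Pro" -> "M4 Pro"
--     # Sort keys longest-first to match "M1 Ultra" before "M1"
--     for key in sorted(_M_SERIES_SKUS.keys(), key=len, reverse=True):
--         if key in clean:
--             return key
--
--     return None
-- ===== SOURCE B (Python) =====
-- _M_SERIES_SKUS: dict[str, tuple[int, float, int]] = {
--     "M1": (8, 68.25, 25),
--     "M1 Pro": (16, 200.0, 45),
--     "M1 Max": (32, 400.0, 75),
--     "M1 Ultra": (64, 800.0, 130),
--     "M2": (10, 100.0, 30),
--     "M2 Pro": (19, 200.0, 50),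
--     "M2 Max": (38, 400.0, 80),
--     "M2 Ultra": (76, 800.0, 140),
--     "M3": (10, 100.0, 35),
--     "M3 Pro": (18, 150.0, 50),
--     "M3 Max": (40, 400.0, 85),
--     "M3 Ultra": (80, 800.0, 150),
--     "M4": (10, 120.0, 40),
--     "M4 Pro": (20, 273.0, 60),
--     "M4 Max": (40, 546.0, 100),
--     "M4 Ultra": (80, 819.0, 160),
-- }
--
--
-- def _match_sku(chip_name: str) -> str | None:
--     """Match a chip name to an SKU table key."""
--     if chip_name in _M_SERIES_SKUS:
--         return chip_name
--
--     clean = chip_name.replace("Apple ", "").strip()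
--     if clean in _M_SERIES_SKUS:
--         return clean
--
--     # Single pass over the table in dict order, keeping the longest
--     # substring key seen so far (strict '>' keeps the earliest on ties,
--     # exactly the stable longest-first scan's choice). No sorting needed.
--     best = None
--     for key in _M_SERIES_SKUS:
--         if key in clean and (best is None or len(key) > len(best)):
--             best = key
--     return best
-- ===== Notes on version B (the rewrite author's own statement) =====
-- stated objective: simpler
-- what changed: The sorted-longest-first loop over the SKU keys is replaced by a single pass over the table in dict order that keeps the longest substring key seen so far (strict '>' preserves the stable sort's tie-break); no sort is performed.
import Mathlib
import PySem

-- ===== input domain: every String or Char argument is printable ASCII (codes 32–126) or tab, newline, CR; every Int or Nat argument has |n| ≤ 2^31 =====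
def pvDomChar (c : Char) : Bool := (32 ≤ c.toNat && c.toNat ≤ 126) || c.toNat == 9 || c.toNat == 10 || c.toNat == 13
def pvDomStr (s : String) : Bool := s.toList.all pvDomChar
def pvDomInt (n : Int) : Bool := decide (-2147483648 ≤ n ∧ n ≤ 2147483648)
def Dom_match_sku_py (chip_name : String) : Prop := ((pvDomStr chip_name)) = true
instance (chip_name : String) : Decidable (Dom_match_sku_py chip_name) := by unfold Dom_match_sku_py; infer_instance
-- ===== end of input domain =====

-- B replaces A's sort-then-first-match scan over the SKU keys by a single pass in dict
-- order that keeps the longest matching key (objective: simpler — no sorting needed).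

-- keys of _M_SERIES_SKUS, in dict insertion order
def skuKeys : List String :=
  ["M1", "M1 Pro", "M1 Max", "M1 Ultra",
   "M2", "M2 Pro", "M2 Max", "M2 Ultra",
   "M3", "M3 Pro", "M3 Max", "M3 Ultra",
   "M4", "M4 Pro", "M4 Max", "M4 Ultra"]

-- ===== PORT A =====
def match_sku_py (chip_name : String) : Option String :=
  if skuKeys.contains chip_name then some chip_name
  else
    let clean := PySem.Str.strip (PySem.Str.replace chip_name "Apple " "")
    if skuKeys.contains clean then some clean
    else
      -- for key in sorted(keys, key=len, reverse=True): if key in clean: return key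
      (PySem.List.sorted skuKeys (fun k => PySem.Str.len k) true).find?
        (fun key => PySem.Str.isIn key clean)

-- ===== PORT B =====
def match_sku_py_alt (chip_name : String) : Option String :=
  if skuKeys.contains chip_name then some chip_name
  else
    let clean := PySem.Str.strip (PySem.Str.replace chip_name "Apple " "")
    if skuKeys.contains clean then some clean
    else
      -- best = None; for key in dict order: if key in clean and (best is None or len(key) > len(best)): best = key
      skuKeys.foldl
        (fun best key =>
          if PySem.Str.isIn key clean &&
             (match best with
              | none => true
              | some b => decide (PySem.Str.len b < PySem.Str.len key)) then
            some key
          else best)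
        none

-- ===== PRECONDITION & SPEC =====
def Spec_match_sku_py (chip_name : String) (out : Option String) : Prop := out = match_sku_py_alt chip_name
instance (chip_name : String) (out : Option String) : Decidable (Spec_match_sku_py chip_name out) := by unfold Spec_match_sku_py; infer_instance

-- ===== CLAIM (what is proved, stated in full; the proofs are below) =====
def Claim_equal_match_sku_py : Prop := ∀ (chip_name : String), Dom_match_sku_py chip_name → Spec_match_sku_py chip_name (match_sku_py chip_name)

-- ===== LEMMAS AND PROOFS =====

-- B's loop body as a named function (definitionally the lambda in match_sku_py_alt)
def bstep (p : String → Bool) (best : Option String) (key : String) : Option String :=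
  if p key &&
     (match best with
      | none => true
      | some b => decide (PySem.Str.len b < PySem.Str.len key)) then
    some key
  else best

-- insertBy inserts x after the longest prefix it does not go before
lemma insertBy_decomp {α : Type} (before : α → α → Bool) (x : α) (s : List α) :
    PySem.List.insertBy before x s =
      s.takeWhile (fun y => !before x y) ++ x :: s.dropWhile (fun y => !before x y) := by
  induction s with
  | nil => rfl
  | cons y ys ih =>
    by_cases h : before x y
    · simp [PySem.List.insertBy, h]
    · simp only [PySem.List.insertBy, h, List.takeWhile_cons, List.dropWhile_cons,
        Bool.not_false, if_neg, Bool.false_eq_true, not_false_eq_true, if_true]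
      simp [ih]

-- in a length-descending list, everything dropped by "len x ≤ len ·" is shorter than x
lemma dropWhile_short (x : String) (s : List String)
    (hp : List.Pairwise (fun a b => PySem.Str.len b ≤ PySem.Str.len a) s) :
    ∀ y ∈ s.dropWhile (fun y => !decide (PySem.Str.len y < PySem.Str.len x)),
      PySem.Str.len y < PySem.Str.len x := by
  induction s with
  | nil => simp
  | cons a as ih =>
    rcases List.pairwise_cons.mp hp with ⟨ha, hpas⟩
    rw [List.dropWhile_cons]
    by_cases hqa : PySem.Str.len a < PySem.Str.len x
    · simp only [hqa, decide_true, Bool.not_true, Bool.false_eq_true, if_false]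
      intro y hy
      rcases List.mem_cons.mp hy with rfl | hy'
      · exact hqa
      · exact lt_of_le_of_lt (ha y hy') hqa
    · simp only [hqa, decide_false, Bool.not_false, if_true]
      exact ih hpas

-- first match in stable longest-first order = keep-the-longest fold in original order
lemma find?_sorted_eq_foldl (p : String → Bool) (l : List String) :
    (PySem.List.sorted l (fun k => PySem.Str.len k) true).find? p =
      l.foldl (bstep p) none := by
  induction l using List.reverseRecOn with
  | nil => rfl
  | append_singleton l x ih =>
    have hs : PySem.List.sorted (l ++ [x]) (fun k => PySem.Str.len k) true
        = PySem.List.insertBy (fun a b => decide (PySem.Str.len b < PySem.Str.len a)) x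
            (PySem.List.sorted l (fun k => PySem.Str.len k) true) := by
      rw [PySem.List.sorted_rev_eq_foldl_insertBy, PySem.List.sorted_rev_eq_foldl_insertBy,
        List.foldl_append]
      rfl
    rw [hs, List.foldl_append, List.foldl_cons, List.foldl_nil, ← ih]
    generalize hsl : PySem.List.sorted l (fun k => PySem.Str.len k) true = s
    have hpair : List.Pairwise (fun a b => PySem.Str.len b ≤ PySem.Str.len a) s := by
      rw [← hsl]; exact PySem.List.sorted_pairwise_rev l _
    rw [insertBy_decomp]
    set q : String → Bool := fun y => !decide (PySem.Str.len y < PySem.Str.len x) with hq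
    have hsplit : s.takeWhile q ++ s.dropWhile q = s := List.takeWhile_append_dropWhile
    have hlong : ∀ y ∈ s.takeWhile q, PySem.Str.len x ≤ PySem.Str.len y := by
      intro y hy
      have h := List.mem_takeWhile_imp hy
      simp only [hq, Bool.not_eq_true', decide_eq_false_iff_not] at h
      exact not_lt.mp h
    have hshort := dropWhile_short x s hpair
    rw [List.find?_append]
    cases hfind : (s.takeWhile q).find? p with
    | some m =>
      have hm : ¬ (m.length < x.length) := by
        have h := hlong m (List.mem_of_find?_eq_some hfind)
        rw [PySem.Str.len_eq, PySem.Str.len_eq] at h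
        intro hlt
        have : (m.length : Int) < (x.length : Int) := by exact_mod_cast hlt
        simp only [String.length] at this
        omega
      have hsfind : s.find? p = some m := by
        conv_lhs => rw [← hsplit]
        rw [List.find?_append, hfind]
        rfl
      rw [hsfind]
      simp [bstep, hm]
    | none =>
      have hsfind : s.find? p = (s.dropWhile q).find? p := by
        conv_lhs => rw [← hsplit]
        rw [List.find?_append, hfind]
        rfl
      rw [hsfind, List.find?_cons]
      by_cases hpx : p x
      · simp only [hpx]
        cases hfd : (s.dropWhile q).find? p with
        | none => simp [bstep, hpx]
        | some b =>
          have hb : PySem.Str.len b < PySem.Str.len x :=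
            hshort b (List.mem_of_find?_eq_some hfd)
          simp only [bstep, hpx, Bool.true_and]
          have hb' : b.length < x.length := by
            rw [PySem.Str.len_eq, PySem.Str.len_eq] at hb
            have : (b.toList.length : Int) < (x.toList.length : Int) := hb
            simp only [String.length, String.toList] at this ⊢
            omega
          simp [hb']
      · simp only [Bool.not_eq_true] at hpx
        simp [bstep, hpx]

-- ===== VERDICT (by name: the statement is the Claim_ definition above) =====
theorem match_sku_py_spec : Claim_equal_match_sku_py := by
  intro chip_name _
  unfold Spec_match_sku_py match_sku_py match_sku_py_alt
  by_cases h1 : skuKeys.contains chip_name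
  · rw [if_pos h1, if_pos h1]
  · rw [if_neg h1, if_neg h1]
    by_cases h2 : skuKeys.contains (PySem.Str.strip (PySem.Str.replace chip_name "Apple " ""))
    · rw [if_pos h2, if_pos h2]
    · rw [if_neg h2, if_neg h2]
      exact find?_sorted_eq_foldl _ _
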